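-- pv_equiv track=rewrite | github.com/namel3ss-Ai/namel3ss | src/namel3ss/compiler/ai_flows.py | _type_valid
-- ===== SOURCE A (Python) =====
-- _ALLOWED_TYPES = {"text", "number", "boolean", "json", "null"}
--
-- def _type_valid(type_name: str, record_names: set[str]) -> bool:
--     if not isinstance(type_name, str) or not type_name.strip():
--         return False
--     normalized = type_name.strip()
--     if "|" in normalized:
--         parts = [part.strip() for part in normalized.split("|")]
--         return all(_type_valid(part, record_names) for part in parts if part)
--     list_inner = _split_generic(normalized, "list")
--     if list_inner is not None:
--         return _type_valid(list_inner, record_names)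
--     map_inner = _split_generic(normalized, "map")
--     if map_inner is not None:
--         left, right = map_inner
--         return _type_valid(left, record_names) and _type_valid(right, record_names)
--     if normalized in _ALLOWED_TYPES:
--         return True
--     return normalized in record_names
--
-- def _split_generic(type_name: str, base: str) -> str | tuple[str, str] | None:
--     prefix = f"{base}<"
--     if not type_name.startswith(prefix) or not type_name.endswith(">"):
--         return None
--     inner = type_name[len(prefix) : -1].strip()
--     if not inner:
--         return None
--     if base == "list":
--         return inner
--     parts = _split_top_level(inner, ",")
--     if len(parts) != 2:
--         return None
--     return parts[0].strip(), parts[1].strip()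
--
-- def _split_top_level(value: str, sep: str) -> list[str]:
--     parts: list[str] = []
--     depth = 0
--     start = 0
--     for idx, ch in enumerate(value):
--         if ch == "<":
--             depth += 1
--         elif ch == ">":
--             depth = max(0, depth - 1)
--         elif ch == sep and depth == 0:
--             parts.append(value[start:idx])
--             start = idx + 1
--     parts.append(value[start:])
--     return parts
-- ===== SOURCE B (Python) =====
-- _ALLOWED_TYPES = {"text", "number", "boolean", "json", "null"}
--
--
-- def _type_valid(type_name: str, record_names: set[str]) -> bool:
--     # Iterative validator: a worklist of type-strings still to check replaces recursion.
--     if not isinstance(type_name, str):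
--         return False
--     stack = [type_name]
--     while stack:
--         current = stack.pop().strip()
--         if not current:
--             return False
--         if "|" in current:
--             for part in reversed(current.split("|")):
--                 part = part.strip()
--                 if part:
--                     stack.append(part)
--             continue
--         list_inner = _split_generic(current, "list")
--         if list_inner is not None:
--             stack.append(list_inner)
--             continue
--         map_inner = _split_generic(current, "map")
--         if map_inner is not None:
--             stack.append(map_inner[1])
--             stack.append(map_inner[0])
--             continue
--         if current not in _ALLOWED_TYPES and current not in record_names:
--             return False
--     return True
--
--
-- def _split_generic(type_name: str, base: str) -> str | tuple[str, str] | None: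
--     prefix = f"{base}<"
--     if not type_name.startswith(prefix) or not type_name.endswith(">"):
--         return None
--     inner = type_name[len(prefix) : -1].strip()
--     if not inner:
--         return None
--     if base == "list":
--         return inner
--     parts = _split_top_level(inner, ",")
--     if len(parts) != 2:
--         return None
--     return parts[0].strip(), parts[1].strip()
--
--
-- def _split_top_level(value: str, sep: str) -> list[str]:
--     parts: list[str] = []
--     depth = 0
--     start = 0
--     for idx, ch in enumerate(value):
--         if ch == "<":
--             depth += 1
--         elif ch == ">":
--             depth = max(0, depth - 1)
--         elif ch == sep and depth == 0:
--             parts.append(value[start:idx])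
--             start = idx + 1
--     parts.append(value[start:])
--     return parts
-- ===== Notes on version B (the rewrite author's own statement) =====
-- stated objective: alternative
-- what changed: Replaces A's recursive descent with an iterative validator that keeps an explicit worklist (stack) of type-strings still to check, popping one per iteration and pushing union parts / generic inner types; the _split_generic and _split_top_level helpers are kept as shared helpers.
import Mathlib
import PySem

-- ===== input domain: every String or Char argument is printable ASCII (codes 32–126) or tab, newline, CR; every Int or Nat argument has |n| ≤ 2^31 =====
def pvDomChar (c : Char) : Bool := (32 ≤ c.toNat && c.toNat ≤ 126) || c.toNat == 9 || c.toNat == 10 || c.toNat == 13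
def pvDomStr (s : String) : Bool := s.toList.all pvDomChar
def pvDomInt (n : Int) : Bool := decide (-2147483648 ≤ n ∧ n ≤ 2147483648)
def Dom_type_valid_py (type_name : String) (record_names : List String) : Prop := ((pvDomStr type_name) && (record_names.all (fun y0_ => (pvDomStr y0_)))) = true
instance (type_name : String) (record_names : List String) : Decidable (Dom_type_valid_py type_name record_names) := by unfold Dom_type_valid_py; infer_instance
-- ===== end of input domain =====

-- B replaces A's recursion by an iterative worklist of type-strings (different decomposition,
-- same cost); the _split_generic/_split_top_level helpers are shared by both programs.

-- ===== PORT A =====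
-- module constant _ALLOWED_TYPES (used for membership tests only)
def pvAllowed : List (List Char) :=
  ["text".toList, "number".toList, "boolean".toList, "json".toList, "null".toList]

-- loop body of _split_top_level, named so that the invariant lemmas below can cite it.
-- State = (parts, depth, start); Nat subtraction 'depth - 1' is exactly Python's max(0, depth-1).
def pvSTstep (value : List Char) (sep : Char)
    (st : List (List Char) × Nat × Int) (p : Int × Char) : List (List Char) × Nat × Int :=
  if p.2 = '<' then (st.1, st.2.1 + 1, st.2.2)
  else if p.2 = '>' then (st.1, st.2.1 - 1, st.2.2)
  else if p.2 = sep ∧ st.2.1 = 0 then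
    (st.1 ++ [PySem.List.slice value (some st.2.2) (some p.1)], st.2.1, p.1 + 1)
  else st

-- port of _split_top_level(value, sep): one pass over enumerate(value)
def pvSplitTop (value : List Char) (sep : Char) : List (List Char) :=
  let st := (PySem.List.enumerate value).foldl (pvSTstep value sep)
    (([], 0, 0) : List (List Char) × Nat × Int)
  st.1 ++ [PySem.List.slice value (some st.2.2) none]

-- port of _split_generic: Sum.inl inner for base "list", Sum.inr (left, right) for "map";
-- 'if len(parts) != 2: return None' is the [a, b] pattern of the match.
def pvSplitGeneric (type_name : List Char) (base : List Char) :
    Option ((List Char) ⊕ (List Char × List Char)) :=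
  if ¬ (PySem.Chars.startswith type_name (base ++ ['<']) = true ∧
        PySem.Chars.endswith type_name ['>'] = true) then none
  else
    let inner := PySem.Chars.strip
      (PySem.List.slice type_name (some ((base ++ ['<']).length : Int)) (some (-1)))
    if inner = [] then none
    else if base = ['l','i','s','t'] then some (Sum.inl inner)
    else
      match pvSplitTop inner ',' with
      | [a, b] => some (Sum.inr (PySem.Chars.strip a, PySem.Chars.strip b))
      | _ => none

-- the body of A's _type_valid, with the recursive call abstracted as rec_
def tvStep (rns : List (List Char)) (rec_ : List Char → Bool) (type_name : List Char) : Bool :=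
  let normalized := PySem.Chars.strip type_name
  if normalized = [] then false
  else if PySem.Chars.isIn ['|'] normalized then
    (((PySem.Chars.splitOn normalized ['|']).map PySem.Chars.strip).filter
      (fun p => ¬ p = [])).all rec_
  else
    match pvSplitGeneric normalized ['l','i','s','t'] with
    | some (Sum.inl inner) => rec_ inner
    | _ =>
      match pvSplitGeneric normalized ['m','a','p'] with
      | some (Sum.inr pr) => rec_ pr.1 && rec_ pr.2
      | _ => if pvAllowed.contains normalized then true else rns.contains normalized

-- A's recursion, fuelled: every recursive argument is strictly shorter than the current
-- string (proved below), so the fuel length+1 used in type_valid_py never runs out.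
def tvAux (rns : List (List Char)) : Nat → List Char → Bool
  | 0, _ => false
  | n + 1, s => tvStep rns (tvAux rns n) s

def type_valid_py (type_name : String) (record_names : List String) : Bool :=
  tvAux (record_names.map String.toList) (type_name.toList.length + 1) type_name.toList

-- ===== PORT B =====
-- Source B: while stack: pop, strip, handle one constructor level, push the sub-type-strings
-- (the stack top is the list head).  The fuel bounds the number of loop iterations: each
-- iteration strictly decreases sum (2*len+1) over the stack, which starts at 2*len+1.
def tvLoop (rns : List (List Char)) : Nat → List (List Char) → Bool
  | _, [] => true
  | 0, _ :: _ => false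
  | fuel + 1, s0 :: rest =>
    let current := PySem.Chars.strip s0
    if current = [] then false
    else if PySem.Chars.isIn ['|'] current then
      tvLoop rns fuel
        ((((PySem.Chars.splitOn current ['|']).map PySem.Chars.strip).filter
          (fun p => ¬ p = [])) ++ rest)
    else
      match pvSplitGeneric current ['l','i','s','t'] with
      | some (Sum.inl inner) => tvLoop rns fuel (inner :: rest)
      | _ =>
        match pvSplitGeneric current ['m','a','p'] with
        | some (Sum.inr pr) => tvLoop rns fuel (pr.1 :: pr.2 :: rest)
        | _ =>
          if ¬ pvAllowed.contains current ∧ ¬ rns.contains current then false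
          else tvLoop rns fuel rest

def type_valid_py_alt (type_name : String) (record_names : List String) : Bool :=
  tvLoop (record_names.map String.toList) (2 * type_name.toList.length + 1) [type_name.toList]

-- ===== PRECONDITION & SPEC =====
def Spec_type_valid_py (type_name : String) (record_names : List String) (out : Bool) : Prop := out = type_valid_py_alt type_name record_names
instance (type_name : String) (record_names : List String) (out : Bool) : Decidable (Spec_type_valid_py type_name record_names out) := by unfold Spec_type_valid_py; infer_instance

-- ===== CLAIM (what is proved, stated in full; the proofs are below) =====
def Claim_equal_type_valid_py : Prop := ∀ (type_name : String) (record_names : List String), Dom_type_valid_py type_name record_names → Spec_type_valid_py type_name record_names (type_valid_py type_name record_names)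

-- ===== LEMMAS AND PROOFS =====

-- A's "true value": tvAux with fuel length+1 (exactly what type_valid_py computes)
def pvV (rns : List (List Char)) (s : List Char) : Bool :=
  tvAux rns (s.length + 1) s

-- stack measure for B's loop
def pvMes (st : List (List Char)) : Nat := (st.map (fun s => 2 * s.length + 1)).sum

-- specification of splitOn for a single-character separator
def pvGsp (c : Char) : List Char → List (List Char)
  | [] => [[]]
  | a :: rest =>
    match pvGsp c rest with
    | [] => []
    | h :: t => if a = c then [] :: h :: t else (a :: h) :: t

def pvConsHead (x : List Char) : List (List Char) → List (List Char)
  | [] => [x]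
  | h :: t => (x ++ h) :: t

lemma pv_strip_le (s : List Char) : (PySem.Chars.strip s).length ≤ s.length := by
  simp only [PySem.Chars.strip, PySem.Chars.rstrip, PySem.Chars.lstrip, List.length_reverse]
  calc (List.dropWhile PySem.Chars.isspace (List.dropWhile PySem.Chars.isspace s).reverse).length
      ≤ (List.dropWhile PySem.Chars.isspace s).reverse.length := List.length_dropWhile_le _ _
    _ ≤ s.length := by simpa using List.length_dropWhile_le PySem.Chars.isspace s

lemma pvGsp_ne_nil (c : Char) (s : List Char) : pvGsp c s ≠ [] := by
  induction s with
  | nil => simp [pvGsp]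
  | cons a rest ih =>
    cases hg : pvGsp c rest with
    | nil => exact absurd hg ih
    | cons h t => simp only [pvGsp, hg]; split <;> simp

lemma pvGsp_stats (c : Char) (s : List Char) :
    ((pvGsp c s).map List.length).sum + (pvGsp c s).length = s.length + 1 ∧
    (pvGsp c s).length = s.count c + 1 := by
  induction s with
  | nil => simp [pvGsp]
  | cons a rest ih =>
    cases hg : pvGsp c rest with
    | nil => exact absurd hg (pvGsp_ne_nil c rest)
    | cons h t =>
      rw [hg] at ih
      obtain ⟨ih1, ih2⟩ := ih
      simp only [List.map_cons, List.sum_cons, List.length_cons] at ih1 ih2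
      by_cases hac : a = c
      · subst hac
        simp [pvGsp, hg]
        omega
      · simp [pvGsp, hg, hac]
        omega

lemma pv_splitOn_go (c : Char) :
    ∀ (fuel : Nat) (l cur : List Char) (accs : List (List Char)),
      l.length < fuel →
      PySem.Chars.splitOn.go [c] fuel l cur accs =
        accs.reverse ++ pvConsHead cur.reverse (pvGsp c l) := by
  intro fuel
  induction fuel with
  | zero => intro l cur accs h; omega
  | succ f ih =>
    intro l cur accs h
    cases l with
    | nil => simp [PySem.Chars.splitOn.go, pvGsp, pvConsHead]
    | cons a rest =>
      rw [PySem.Chars.splitOn.go]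
      by_cases hac : c = a
      · have hpre : [c].isPrefixOf (a :: rest) = true := by simp [List.isPrefixOf, hac]
        rw [if_pos hpre]
        rw [ih _ _ _ (by simp at h ⊢; omega)]
        cases hg : pvGsp c rest with
        | nil => exact absurd hg (pvGsp_ne_nil c rest)
        | cons hh tt => simp [pvGsp, hg, ← hac, pvConsHead]
      · have hpre : ¬ ([c].isPrefixOf (a :: rest) = true) := by
          simp [List.isPrefixOf]; exact hac
        rw [if_neg hpre]
        rw [ih _ _ _ (by simp at h ⊢; omega)]
        cases hg : pvGsp c rest with
        | nil => exact absurd hg (pvGsp_ne_nil c rest)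
        | cons hh tt =>
          have hac' : ¬ a = c := fun e => hac e.symm
          simp [pvGsp, hg, hac', pvConsHead]

lemma pv_splitOn_eq (c : Char) (s : List Char) :
    PySem.Chars.splitOn s [c] = pvGsp c s := by
  rw [PySem.Chars.splitOn, pv_splitOn_go c (s.length+1) s [] [] (by omega)]
  cases hg : pvGsp c s with
  | nil => exact absurd hg (pvGsp_ne_nil c s)
  | cons h t => simp [pvConsHead]

lemma pv_enumerate_bound {α : Type} (v : List α) :
    ∀ (i : Int), ∀ p ∈ PySem.List.enumerate v i, i ≤ p.1 ∧ p.1 < i + v.length := by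
  induction v with
  | nil => intro i p hp; simp [PySem.List.enumerate] at hp
  | cons x t ih =>
    intro i p hp
    simp only [PySem.List.enumerate, List.mem_cons] at hp
    rcases hp with rfl | hp
    · simp
    · have := ih (i+1) p hp
      simp only [List.length_cons]
      push_cast
      omega

lemma pv_clampIdx_nonneg (n : Nat) (a : Int) (h : 0 ≤ a) :
    PySem.List.clampIdx n a = min a.toNat n := by
  simp [PySem.List.clampIdx, not_lt.mpr h]

lemma pv_enumerate_pairwise {α : Type} (v : List α) :
    ∀ (i : Int), (PySem.List.enumerate v i).Pairwise (fun p q => p.1 < q.1) := by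
  induction v with
  | nil => intro i; simp [PySem.List.enumerate]
  | cons x t ih =>
    intro i
    simp only [PySem.List.enumerate]
    refine List.Pairwise.cons ?_ (ih (i+1))
    intro q hq
    have := pv_enumerate_bound t (i+1) q hq
    simp only []
    omega

lemma pv_splitTop_inv (value : List Char) (sep : Char) :
    ∀ (l : List (Int × Char)) (st : List (List Char) × Nat × Int),
      (∀ p ∈ l, st.2.2 ≤ p.1 ∧ p.1 < (value.length : Int)) →
      l.Pairwise (fun p q => p.1 < q.1) →
      0 ≤ st.2.2 →
      (st.1.map List.length).sum + st.1.length ≤ PySem.List.clampIdx value.length st.2.2 →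
      0 ≤ (l.foldl (pvSTstep value sep) st).2.2 ∧
      ((l.foldl (pvSTstep value sep) st).1.map List.length).sum +
          (l.foldl (pvSTstep value sep) st).1.length ≤
        PySem.List.clampIdx value.length (l.foldl (pvSTstep value sep) st).2.2 := by
  intro l
  induction l with
  | nil => intro st hl hch h0 hs; exact ⟨h0, hs⟩
  | cons p rest ih =>
    intro st hl hch h0 hs
    have hp := hl p (by simp)
    have hp0 : 0 ≤ p.1 := le_trans h0 hp.1
    simp only [List.foldl_cons]
    have hrest : ∀ q ∈ rest, st.2.2 ≤ q.1 ∧ q.1 < (value.length : Int) :=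
      fun q hq => hl q (by simp [hq])
    have hch' := (List.pairwise_cons.mp hch).2
    have hgt := (List.pairwise_cons.mp hch).1
    unfold pvSTstep
    by_cases h1 : p.2 = '<'
    · rw [if_pos h1]; exact ih _ hrest hch' h0 hs
    · rw [if_neg h1]
      by_cases h2 : p.2 = '>'
      · rw [if_pos h2]; exact ih _ hrest hch' h0 hs
      · rw [if_neg h2]
        by_cases h3 : p.2 = sep ∧ st.2.1 = 0
        · rw [if_pos h3]
          refine ih _ ?_ hch' ?_ ?_ <;> dsimp only
          · exact fun q hq => ⟨by have := hgt q hq; omega, (hrest q hq).2⟩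
          · omega
          · simp only [List.map_append, List.sum_append, List.length_append,
              List.map_cons, List.sum_cons, List.length_cons, List.map_nil,
              List.sum_nil, List.length_nil]
            rw [PySem.List.length_slice]
            rw [pv_clampIdx_nonneg _ _ h0] at hs
            rw [pv_clampIdx_nonneg _ _ h0, pv_clampIdx_nonneg _ _ hp0,
              pv_clampIdx_nonneg _ _ (by omega : (0:Int) ≤ p.1 + 1)]
            have hsp : st.2.2 ≤ p.1 := hp.1
            omega
        · rw [if_neg h3]; exact ih _ hrest hch' h0 hs

lemma pv_splitTop_stats (value : List Char) (sep : Char) :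
    ((pvSplitTop value sep).map List.length).sum + (pvSplitTop value sep).length
      ≤ value.length + 1 := by
  have h := pv_splitTop_inv value sep (PySem.List.enumerate value)
    (([], 0, 0) : List (List Char) × Nat × Int)
    (fun p hp => by
      have := pv_enumerate_bound value 0 p hp
      exact ⟨by show (0:Int) ≤ p.1; omega, by omega⟩)
    (pv_enumerate_pairwise value 0)
    (by simp) (by simp)
  unfold pvSplitTop
  simp only [List.map_append, List.sum_append, List.length_append,
    List.map_cons, List.sum_cons, List.length_cons, List.map_nil, List.sum_nil,
    List.length_nil]
  rw [PySem.List.slice_some_none, List.length_drop]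
  have hle := PySem.List.clampIdx_le value.length
    ((PySem.List.enumerate value).foldl (pvSTstep value sep)
      (([], 0, 0) : List (List Char) × Nat × Int)).2.2
  omega

lemma pv_inner_len {norm base : List Char}
    (hsw : PySem.Chars.startswith norm (base ++ ['<']) = true) :
    (PySem.Chars.strip
      (PySem.List.slice norm (some ((base ++ ['<']).length : Int)) (some (-1)))).length
      + 1 + (base ++ ['<']).length ≤ norm.length + 1 := by
  have hpre : (base ++ ['<']) <+: norm := by
    simpa [PySem.Chars.startswith] using List.isPrefixOf_iff_prefix.mp hsw
  have hL : (base ++ ['<']).length ≤ norm.length := hpre.length_le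
  have h1 := pv_strip_le (PySem.List.slice norm (some ((base ++ ['<']).length : Int)) (some (-1)))
  rw [PySem.List.length_slice, PySem.List.clampIdx_neg_one,
    pv_clampIdx_nonneg _ _ (by positivity)] at h1
  simp only [Int.toNat_natCast] at h1
  omega

lemma pv_splitGeneric_inl {norm base inner : List Char}
    (h : pvSplitGeneric norm base = some (Sum.inl inner)) :
    inner ≠ [] ∧ inner.length + 1 ≤ norm.length := by
  unfold pvSplitGeneric at h
  by_cases hg : (PySem.Chars.startswith norm (base ++ ['<']) = true ∧
        PySem.Chars.endswith norm ['>'] = true)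
  · rw [if_neg (not_not_intro hg)] at h
    have hinner := pv_inner_len (base := base) hg.1
    set inner0 := PySem.Chars.strip
      (PySem.List.slice norm (some ((base ++ ['<']).length : Int)) (some (-1))) with hi0
    by_cases hne : inner0 = []
    · rw [if_pos hne] at h; exact absurd h (by simp)
    · rw [if_neg hne] at h
      by_cases hb : base = ['l','i','s','t']
      · rw [if_pos hb] at h
        have heqi : inner = inner0 := by simpa using h.symm
        rw [heqi]
        refine ⟨hne, ?_⟩
        have h1 : 0 < inner0.length := List.length_pos_of_ne_nil hne
        simp only [List.length_append, List.length_cons] at hinner ⊢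
        omega
      · rw [if_neg hb] at h
        split at h <;> simp at h
  · rw [if_pos hg] at h; exact absurd h (by simp)

lemma pv_splitGeneric_inr {norm base : List Char} {pr : List Char × List Char}
    (h : pvSplitGeneric norm base = some (Sum.inr pr)) :
    pr.1.length + pr.2.length + 2 ≤ norm.length := by
  unfold pvSplitGeneric at h
  by_cases hg : (PySem.Chars.startswith norm (base ++ ['<']) = true ∧
        PySem.Chars.endswith norm ['>'] = true)
  · rw [if_neg (not_not_intro hg)] at h
    have hinner := pv_inner_len (base := base) hg.1
    set inner0 := PySem.Chars.strip
      (PySem.List.slice norm (some ((base ++ ['<']).length : Int)) (some (-1))) with hi0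
    by_cases hne : inner0 = []
    · rw [if_pos hne] at h; exact absurd h (by simp)
    · rw [if_neg hne] at h
      by_cases hb : base = ['l','i','s','t']
      · rw [if_pos hb] at h; exact absurd h (by simp)
      · rw [if_neg hb] at h
        split at h
        case _ a b heq =>
          have hst := pv_splitTop_stats inner0 ','
          rw [heq] at hst
          simp only [List.map_cons, List.map_nil, List.sum_cons, List.sum_nil,
            List.length_cons, List.length_nil] at hst
          have hpr : pr = (PySem.Chars.strip a, PySem.Chars.strip b) := by simpa using h.symm
          subst hpr
          have ha := pv_strip_le a
          have hbb := pv_strip_le b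
          have h1 : 0 < inner0.length := List.length_pos_of_ne_nil hne
          simp only [List.length_append, List.length_cons] at hinner
          simp only []
          omega
        case _ => simp at h
  · rw [if_pos hg] at h; exact absurd h (by simp)

lemma pv_mem_le_sum {p : List Char} {parts : List (List Char)} (h : p ∈ parts) :
    p.length ≤ (parts.map List.length).sum :=
  List.single_le_sum (by simp) _ (List.mem_map_of_mem h)

lemma pv_all_congr {l : List (List Char)} {p q : List Char → Bool}
    (h : ∀ x ∈ l, p x = q x) : l.all p = l.all q := by
  induction l with
  | nil => rfl
  | cons a t ih =>
    simp only [List.all_cons, h a (by simp)]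
    rw [ih (fun x hx => h x (by simp [hx]))]

lemma pv_sum_filter_le (xs : List (List Char)) (q : List Char → Bool) :
    ((xs.filter q).map List.length).sum ≤ (xs.map List.length).sum := by
  induction xs with
  | nil => simp
  | cons a t ih =>
    simp only [List.filter_cons]
    split
    · simp only [List.map_cons, List.sum_cons]; omega
    · simp only [List.map_cons, List.sum_cons]; omega

lemma pv_mes_eq (xs : List (List Char)) :
    pvMes xs = 2 * (xs.map List.length).sum + xs.length := by
  induction xs with
  | nil => simp [pvMes]
  | cons a t ih => simp [pvMes] at ih ⊢; omega

lemma pv_mes_append (a b : List (List Char)) : pvMes (a ++ b) = pvMes a + pvMes b := by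
  simp [pvMes]

lemma pv_union_parts (s : List Char) (h : PySem.Chars.isIn ['|'] s = true) :
    (∀ p ∈ ((PySem.Chars.splitOn s ['|']).map PySem.Chars.strip).filter (fun p => ¬ p = []),
        p.length + 1 ≤ s.length) ∧
    pvMes (((PySem.Chars.splitOn s ['|']).map PySem.Chars.strip).filter (fun p => ¬ p = []))
      ≤ 2 * s.length := by
  have hmem : '|' ∈ s := by
    have := (PySem.Chars.isIn_iff_infix (sub := ['|']) (s := s)).mp h
    exact List.singleton_sublist.mp this.sublist
  have hcnt : 0 < s.count '|' := List.count_pos_iff.mpr hmem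
  have hst := pvGsp_stats '|' s
  rw [pv_splitOn_eq]
  set P := pvGsp '|' s with hP
  have hsum : (P.map List.length).sum + s.count '|' = s.length := by omega
  have hmemle : ∀ p ∈ (P.map PySem.Chars.strip).filter (fun p => ¬ p = []),
      p.length + 1 ≤ s.length := by
    intro p hp
    have hp' := (List.mem_filter.mp hp).1
    obtain ⟨q, hq, rfl⟩ := List.mem_map.mp hp'
    have := pv_strip_le q
    have := pv_mem_le_sum hq
    omega
  refine ⟨hmemle, ?_⟩
  rw [pv_mes_eq]
  have hlen : ((P.map PySem.Chars.strip).filter (fun p => ¬ p = [])).length ≤ P.length :=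
    le_trans (List.length_filter_le _ _) (by simp)
  have hsum2 : (((P.map PySem.Chars.strip).filter (fun p => ¬ p = [])).map List.length).sum
      ≤ (P.map List.length).sum := by
    calc (((P.map PySem.Chars.strip).filter (fun p => ¬ p = [])).map List.length).sum
        ≤ ((P.map PySem.Chars.strip).map List.length).sum :=
          pv_sum_filter_le _ _
      _ ≤ (P.map List.length).sum := by
          rw [List.map_map]
          apply List.sum_le_sum
          intro q hq
          exact pv_strip_le q
  omega

lemma tvStep_congr (rns : List (List Char)) (r1 r2 : List Char → Bool) (s : List Char)
    (h : ∀ t : List Char, t.length < s.length → r1 t = r2 t) :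
    tvStep rns r1 s = tvStep rns r2 s := by
  unfold tvStep
  have hsl := pv_strip_le s
  by_cases hemp : PySem.Chars.strip s = []
  · simp [hemp]
  · rw [if_neg hemp, if_neg hemp]
    by_cases hbar : PySem.Chars.isIn ['|'] (PySem.Chars.strip s) = true
    · rw [if_pos hbar, if_pos hbar]
      apply pv_all_congr
      intro p hp
      have := (pv_union_parts _ hbar).1 p hp
      exact h p (by omega)
    · rw [if_neg hbar, if_neg hbar]
      cases hsg1 : pvSplitGeneric (PySem.Chars.strip s) ['l','i','s','t'] with
      | some v =>
        cases v with
        | inl inner =>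
          simp only
          have := (pv_splitGeneric_inl hsg1).2
          exact h inner (by omega)
        | inr pr =>
          simp only
          cases hsg2 : pvSplitGeneric (PySem.Chars.strip s) ['m','a','p'] with
          | some w =>
            cases w with
            | inl i2 => simp only
            | inr pr2 =>
              simp only
              have := pv_splitGeneric_inr hsg2
              rw [h pr2.1 (by omega), h pr2.2 (by omega)]
          | none => simp only
      | none =>
        simp only
        cases hsg2 : pvSplitGeneric (PySem.Chars.strip s) ['m','a','p'] with
        | some w =>
          cases w with
          | inl i2 => simp only
          | inr pr2 =>
            simp only
            have := pv_splitGeneric_inr hsg2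
            rw [h pr2.1 (by omega), h pr2.2 (by omega)]
        | none => simp only

lemma tv_mono (rns : List (List Char)) :
    ∀ (n : Nat) (s : List Char) (m : Nat), s.length < n → s.length < m →
      tvAux rns n s = tvAux rns m s := by
  intro n
  induction n with
  | zero => intro s m h _; omega
  | succ n ih =>
    intro s m hn hm
    cases m with
    | zero => omega
    | succ m' =>
      show tvStep rns (tvAux rns n) s = tvStep rns (tvAux rns m') s
      apply tvStep_congr
      intro t ht
      exact ih t m' (by omega) (by omega)

lemma pvV_eq (rns : List (List Char)) (s : List Char) :
    pvV rns s = tvStep rns (pvV rns) s := by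
  show tvStep rns (tvAux rns s.length) s = tvStep rns (pvV rns) s
  apply tvStep_congr
  intro t ht
  exact tv_mono rns s.length t (t.length + 1) ht (by omega)

lemma tvLoop_eq (rns : List (List Char)) :
    ∀ (fuel : Nat) (st : List (List Char)), pvMes st ≤ fuel →
      tvLoop rns fuel st = st.all (pvV rns) := by
  intro fuel
  induction fuel with
  | zero =>
    intro st hm
    cases st with
    | nil => rfl
    | cons a t => simp [pvMes] at hm
  | succ fuel ih =>
    intro st hm
    cases st with
    | nil => rfl
    | cons s0 rest =>
      have hm0 : 2 * s0.length + 1 + pvMes rest ≤ fuel + 1 := by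
        simpa [pvMes] using hm
      have hsl := pv_strip_le s0
      simp only [tvLoop, List.all_cons]
      rw [pvV_eq]
      unfold tvStep
      by_cases hemp : PySem.Chars.strip s0 = []
      · simp [hemp]
      · rw [if_neg hemp, if_neg hemp]
        by_cases hbar : PySem.Chars.isIn ['|'] (PySem.Chars.strip s0) = true
        · rw [if_pos hbar, if_pos hbar]
          have hup := (pv_union_parts _ hbar).2
          rw [ih _ (by rw [pv_mes_append]; omega)]
          simp [List.all_append]
        · rw [if_neg hbar, if_neg hbar]
          cases hsg1 : pvSplitGeneric (PySem.Chars.strip s0) ['l','i','s','t'] with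
          | some v =>
            cases v with
            | inl inner =>
              simp only
              have hi := (pv_splitGeneric_inl hsg1).2
              rw [ih _ (by simp [pvMes] at hm0 ⊢; omega)]
              simp
            | inr pr =>
              simp only
              cases hsg2 : pvSplitGeneric (PySem.Chars.strip s0) ['m','a','p'] with
              | some w =>
                cases w with
                | inl i2 =>
                  simp only
                  have hrest := ih rest (show pvMes rest ≤ fuel by omega)
                  by_cases ha : PySem.Chars.strip s0 ∈ pvAllowed
                  · simp [ha, hrest]
                  · by_cases hr : PySem.Chars.strip s0 ∈ rns
                    · simp [ha, hr, hrest]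
                    · simp [ha, hr]
                | inr pr2 =>
                  simp only
                  have hi := pv_splitGeneric_inr hsg2
                  rw [ih _ (by simp [pvMes] at hm0 ⊢; omega)]
                  simp [Bool.and_assoc]
              | none =>
                simp only
                have hrest := ih rest (show pvMes rest ≤ fuel by omega)
                by_cases ha : PySem.Chars.strip s0 ∈ pvAllowed
                · simp [ha, hrest]
                · by_cases hr : PySem.Chars.strip s0 ∈ rns
                  · simp [ha, hr, hrest]
                  · simp [ha, hr]
          | none =>
            simp only
            cases hsg2 : pvSplitGeneric (PySem.Chars.strip s0) ['m','a','p'] with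
            | some w =>
              cases w with
              | inl i2 =>
                simp only
                have hrest := ih rest (show pvMes rest ≤ fuel by omega)
                by_cases ha : PySem.Chars.strip s0 ∈ pvAllowed
                · simp [ha, hrest]
                · by_cases hr : PySem.Chars.strip s0 ∈ rns
                  · simp [ha, hr, hrest]
                  · simp [ha, hr]
              | inr pr2 =>
                simp only
                have hi := pv_splitGeneric_inr hsg2
                rw [ih _ (by simp [pvMes] at hm0 ⊢; omega)]
                simp [Bool.and_assoc]
            | none =>
              simp only
              have hrest := ih rest (show pvMes rest ≤ fuel by omega)
              by_cases ha : PySem.Chars.strip s0 ∈ pvAllowed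
              · simp [ha, hrest]
              · by_cases hr : PySem.Chars.strip s0 ∈ rns
                · simp [ha, hr, hrest]
                · simp [ha, hr]

-- ===== VERDICT (by name: the statement is the Claim_ definition above) =====
theorem type_valid_py_spec : Claim_equal_type_valid_py := by
  intro type_name record_names _
  unfold Spec_type_valid_py type_valid_py type_valid_py_alt
  rw [tvLoop_eq _ _ _ (by simp [pvMes])]
  simp [pvV]
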